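-- pv_equiv track=rewrite | github.com/SupreLTD/XboxPS_parser | parser.py | set_zero_last
-- ===== SOURCE A (Python) =====
-- def set_zero_last(numb):
--     new_numb = ''
--     for index, item in enumerate(str(numb)):
--         if index + 1 == len(str(numb)):
--             new_numb += '0'
--         else:
--             new_numb += item
--     return new_numb
-- ===== SOURCE B (Python) =====
-- def set_zero_last(numb):
--     s = str(numb)
--     return s[:-1] + '0'
-- ===== Notes on version B (the rewrite author's own statement) =====
-- stated objective: simpler
-- what changed: Replaces the enumerate loop (which rebuilds str(numb) and re-measures its length on every iteration while concatenating character by character) with a single closed-form slice-and-concatenate s[:-1] + '0'.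
import Mathlib
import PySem

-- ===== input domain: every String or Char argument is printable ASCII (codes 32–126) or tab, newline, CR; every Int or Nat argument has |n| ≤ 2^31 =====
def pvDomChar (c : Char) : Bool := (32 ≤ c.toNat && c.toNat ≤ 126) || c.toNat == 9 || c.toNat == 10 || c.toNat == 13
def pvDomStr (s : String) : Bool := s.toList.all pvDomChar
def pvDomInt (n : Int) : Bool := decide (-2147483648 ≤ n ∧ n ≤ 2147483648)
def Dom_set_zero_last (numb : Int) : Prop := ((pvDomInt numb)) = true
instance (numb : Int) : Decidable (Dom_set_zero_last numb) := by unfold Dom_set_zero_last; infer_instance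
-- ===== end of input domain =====

-- B replaces A's character-by-character enumerate loop by the closed form str(numb)[:-1] + '0'.
-- ===== PORT A =====
def set_zero_last (numb : Int) : String :=
  String.ofList <|
    (PySem.List.enumerate (PySem.Int.toChars numb) 0).foldl
      (fun new_numb p =>
        if p.1 + 1 = ((PySem.Int.toChars numb).length : Int) then new_numb ++ ['0']
        else new_numb ++ [p.2])
      []

-- ===== PORT B =====
def set_zero_last_alt (numb : Int) : String :=
  String.ofList (PySem.List.slice (PySem.Int.toChars numb) none (some (-1)) ++ ['0'])

-- ===== PRECONDITION & SPEC =====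
def Spec_set_zero_last (numb : Int) (out : String) : Prop := out = set_zero_last_alt numb
instance (numb : Int) (out : String) : Decidable (Spec_set_zero_last numb out) := by unfold Spec_set_zero_last; infer_instance

-- ===== CLAIM (what is proved, stated in full; the proofs are below) =====
def Claim_equal_set_zero_last : Prop := ∀ (numb : Int), Dom_set_zero_last numb → Spec_set_zero_last numb (set_zero_last numb)

-- ===== LEMMAS AND PROOFS =====



lemma toDigits_ne_nil (b n : Nat) : Nat.toDigits b n ≠ [] := by
  have h : 0 < (Nat.toDigits b n).length := by
    show 0 < (Nat.toDigitsCore b (n+1) n []).length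
    rw [Nat.toDigitsCore]
    split
    · simp
    · rw [Nat.toDigitsCore_lens_eq]; omega
  exact List.ne_nil_of_length_pos h

lemma toChars_ne_nil (n : Int) : PySem.Int.toChars n ≠ [] := by
  unfold PySem.Int.toChars
  split
  · simp
  · exact toDigits_ne_nil 10 n.toNat

lemma fold_enum_eq_map (n : Int) (l : List Char) : ∀ (s : Int) (acc : List Char),
    (PySem.List.enumerate l s).foldl
      (fun a p => if p.1 + 1 = n then a ++ ['0'] else a ++ [p.2]) acc
    = acc ++ (PySem.List.enumerate l s).map (fun p => if p.1 + 1 = n then '0' else p.2) := by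
  induction l with
  | nil => intro s acc; simp [PySem.List.enumerate_nil]
  | cons x xs ih =>
    intro s acc
    rw [PySem.List.enumerate_cons]
    simp only [List.foldl_cons, List.map_cons, ih]
    by_cases h : s + 1 = n <;> simp [h]

lemma map_enum_eq_dropLast (l : List Char) (hl : l ≠ []) : ∀ (s : Int),
    (PySem.List.enumerate l s).map
      (fun p => if p.1 + 1 = s + (l.length : Int) then '0' else p.2)
    = l.dropLast ++ ['0'] := by
  induction l with
  | nil => exact absurd rfl hl
  | cons x xs ih =>
    intro s
    rw [PySem.List.enumerate_cons]
    rcases xs with _ | ⟨y, ys⟩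
    · simp [PySem.List.enumerate_nil]
    · simp only [List.map_cons, List.length_cons]
      rw [if_neg (by push_cast; omega)]
      rw [List.dropLast_cons_of_ne_nil (List.cons_ne_nil y ys)]
      have h2 := ih (List.cons_ne_nil y ys) (s + 1)
      simp only [List.length_cons] at h2
      rw [List.cons_append]
      refine congrArg (x :: ·) ?_
      rw [← h2]
      refine List.map_congr_left fun p _ => ?_
      push_cast
      split_ifs with h1 h2 <;> first | rfl | omega

-- ===== VERDICT (by name: the statement is the Claim_ definition above) =====
theorem set_zero_last_spec : Claim_equal_set_zero_last := by
  intro numb _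
  unfold Spec_set_zero_last set_zero_last set_zero_last_alt
  rw [PySem.List.slice_to_neg_one]
  rw [fold_enum_eq_map]
  rw [show ((PySem.Int.toChars numb).length : Int) = 0 + ((PySem.Int.toChars numb).length : Int) from by ring]
  rw [map_enum_eq_dropLast _ (toChars_ne_nil numb) 0]
  simp
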